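-- pv_equiv track=rewrite | github.com/mladendinev/Algorithms | leetcode/GreatestCross.py | findPairsColumns
-- ===== SOURCE A (Python) =====
-- def findPairsColumns(idx, el):
--     current_index = 0
--     pairs = list()
--     while current_index < len(el):
--         if el[current_index] == 'G':
--             start = current_index
--             end = current_index
--             pairs.append(((start, idx), (midpoint(start, end), idx), (end, idx)))
--             while end < len(el):
--                 if end + 1 < len(el) and el[end + 1] == 'G':
--                     end += 1
--                     if end != start and ((end - start) % 2) == 0:
--                         pairs.append(((start, idx), (midpoint(start, end), idx), (end, idx)))
--                 else:
--                     break
--         current_index += 1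
--     return pairs
--
-- def midpoint(x, y):
--     if x != y:
--         return int((x + y) / 2)
--     else:
--         return y
-- ===== SOURCE B (Python) =====
-- def findPairsColumns(idx, el):
--     # Pass 1: collect maximal runs of consecutive 'G' as index intervals [s, e].
--     runs = []
--     i = 0
--     n = len(el)
--     while i < n:
--         if el[i] == 'G':
--             j = i
--             while j + 1 < n and el[j + 1] == 'G':
--                 j += 1
--             runs.append((i, j))
--             i = j + 1
--         else:
--             i += 1
--     # Pass 2: for each run emit every (start, midpoint, end) triple with an
--     # even-length gap, end stepping by 2, in the same order A produces.
--     pairs = []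
--     for s, e in runs:
--         for start in range(s, e + 1):
--             for end in range(start, e + 1, 2):
--                 pairs.append(((start, idx), ((start + end) // 2, idx), (end, idx)))
--     return pairs
-- ===== Notes on version B (the rewrite author's own statement) =====
-- stated objective: simpler
-- what changed: A re-expands the whole remaining G-run from every position with a per-step parity check; B first extracts maximal G-runs in one scan and then emits each run's triples with a plain step-2 range loop.
import Mathlib
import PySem

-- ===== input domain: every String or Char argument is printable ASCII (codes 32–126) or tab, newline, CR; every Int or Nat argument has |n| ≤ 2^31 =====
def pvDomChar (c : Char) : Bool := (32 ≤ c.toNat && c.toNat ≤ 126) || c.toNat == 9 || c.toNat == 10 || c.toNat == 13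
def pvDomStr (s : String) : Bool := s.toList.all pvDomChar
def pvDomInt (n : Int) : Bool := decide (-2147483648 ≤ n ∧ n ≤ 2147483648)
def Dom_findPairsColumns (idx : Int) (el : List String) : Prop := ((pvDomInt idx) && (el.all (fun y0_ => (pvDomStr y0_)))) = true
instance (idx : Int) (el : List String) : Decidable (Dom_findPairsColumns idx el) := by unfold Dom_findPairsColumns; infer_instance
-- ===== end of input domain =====

-- B rewrites A's per-position re-expansion of 'G' cells as run detection plus a step-2 inner loop (objective: simpler); same return value everywhere.

-- ===== PORT A =====
-- midpoint: int((x+y)/2) truncates toward zero, exactly Int.tdiv (exact: all uses have 0 ≤ x+y < 2^53, where float division is exact)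
def pvMidpointA (x y : Int) : Int := if x ≠ y then Int.tdiv (x + y) 2 else y

-- inner while loop of A: expands `end` while the next cell is 'G', appending even-gap triples
def pvInnerA (el : List String) (idx : Int) (start endv : Nat)
    (acc : List ((Int × Int) × (Int × Int) × (Int × Int))) :
    List ((Int × Int) × (Int × Int) × (Int × Int)) :=
  if endv < el.length then
    if endv + 1 < el.length && el.getD (endv + 1) "" == "G" then
      let e := endv + 1
      let acc' :=
        if e ≠ start && (e - start) % 2 == 0 then
          acc ++ [(((start : Int), idx), (pvMidpointA (start : Int) (e : Int), idx), ((e : Int), idx))]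
        else acc
      pvInnerA el idx start e acc'
    else acc
  else acc
termination_by el.length - endv

-- outer while loop of A
def pvOuterA (el : List String) (idx : Int) (i : Nat)
    (acc : List ((Int × Int) × (Int × Int) × (Int × Int))) :
    List ((Int × Int) × (Int × Int) × (Int × Int)) :=
  if i < el.length then
    pvOuterA el idx (i + 1)
      (if el.getD i "" == "G" then
        pvInnerA el idx i i
          (acc ++ [(((i : Int), idx), (pvMidpointA (i : Int) (i : Int), idx), ((i : Int), idx))])
      else acc)
  else acc
termination_by el.length - i

def findPairsColumns (idx : Int) (el : List String) : List ((Int × Int) × (Int × Int) × (Int × Int)) :=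
  pvOuterA el idx 0 []

-- ===== PORT B =====
-- end of the maximal run of 'G' cells starting at j (B's inner `while j + 1 < n and el[j+1] == 'G'` loop)
def pvRunEnd (el : List String) (j : Nat) : Nat :=
  if j + 1 < el.length && el.getD (j + 1) "" == "G" then pvRunEnd el (j + 1) else j
termination_by el.length - j
decreasing_by simp_all; omega

-- needed for pvRuns's termination
theorem pvRunEnd_ge (el : List String) (j : Nat) : j ≤ pvRunEnd el j := by
  fun_induction pvRunEnd el j with
  | case1 j h ih => omega
  | case2 j h => omega

-- B's first pass: the maximal 'G' runs from position i on, in order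
def pvRuns (el : List String) (i : Nat) : List (Nat × Nat) :=
  if _h : i < el.length then
    if el.getD i "" == "G" then
      (i, pvRunEnd el i) :: pvRuns el (pvRunEnd el i + 1)
    else pvRuns el (i + 1)
  else []
termination_by el.length - i
decreasing_by
  · have := pvRunEnd_ge el i; omega
  · omega

-- B's second pass; range(start, e+1, 2) is List.range' start ((e+2-start)/2) 2
def findPairsColumns_alt (idx : Int) (el : List String) : List ((Int × Int) × (Int × Int) × (Int × Int)) :=
  (pvRuns el 0).flatMap (fun r : Nat × Nat =>
    (List.range' r.1 (r.2 + 1 - r.1)).flatMap (fun start : Nat =>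
      (List.range' start ((r.2 + 2 - start) / 2) 2).map (fun endv : Nat =>
        (((start : Int), idx), (PySem.Int.floordiv ((start : Int) + (endv : Int)) 2, idx), ((endv : Int), idx)))))

-- ===== PRECONDITION & SPEC =====
def Spec_findPairsColumns (idx : Int) (el : List String) (out : List ((Int × Int) × (Int × Int) × (Int × Int))) : Prop := out = findPairsColumns_alt idx el
instance (idx : Int) (el : List String) (out : List ((Int × Int) × (Int × Int) × (Int × Int))) : Decidable (Spec_findPairsColumns idx el out) := by unfold Spec_findPairsColumns; infer_instance

-- ===== CLAIM (what is proved, stated in full; the proofs are below) =====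
def Claim_equal_findPairsColumns : Prop := ∀ (idx : Int) (el : List String), Dom_findPairsColumns idx el → Spec_findPairsColumns idx el (findPairsColumns idx el)

-- ===== LEMMAS AND PROOFS =====

-- the triple A appends for (start, v)
def pvTripA (idx : Int) (s v : Nat) : (Int × Int) × (Int × Int) × (Int × Int) :=
  (((s : Int), idx), (pvMidpointA (s : Int) (v : Int), idx), ((v : Int), idx))

-- the triple B appends for (start, v)
def pvTrip (idx : Int) (s v : Nat) : (Int × Int) × (Int × Int) × (Int × Int) :=
  (((s : Int), idx), (PySem.Int.floordiv ((s : Int) + (v : Int)) 2, idx), ((v : Int), idx))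

-- B's list of triples for a fixed start within a run ending at e
def pvBlockB (idx : Int) (start e : Nat) : List ((Int × Int) × (Int × Int) × (Int × Int)) :=
  (List.range' start ((e + 2 - start) / 2) 2).map (fun endv => pvTrip idx start endv)

-- what B emits from position i on
def pvFromB (el : List String) (idx : Int) (i : Nat) : List ((Int × Int) × (Int × Int) × (Int × Int)) :=
  (pvRuns el i).flatMap (fun r =>
    (List.range' r.1 (r.2 + 1 - r.1)).flatMap (fun start => pvBlockB idx start r.2))

theorem pvMidpointA_eq (s e : Nat) :
    pvMidpointA (s : Int) (e : Int) = PySem.Int.floordiv ((s : Int) + (e : Int)) 2 := by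
  unfold pvMidpointA
  rw [PySem.Int.floordiv_eq_ediv_of_pos (by omega)]
  split_ifs with h
  · have h1 : ((s : Int) + e) = ((s + e : Nat) : Int) := by push_cast; ring
    rw [h1, show ((2:Int)) = ((2:Nat):Int) from rfl, ← Int.ofNat_tdiv]
    omega
  · omega

theorem pvRunEnd_succ (el : List String) (j : Nat) (h : j < pvRunEnd el j) :
    j + 1 < el.length ∧ el.getD (j + 1) "" == "G" ∧ pvRunEnd el (j + 1) = pvRunEnd el j := by
  by_cases hc : (j + 1 < el.length && el.getD (j + 1) "" == "G") = true
  · have h2 := hc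
    simp only [Bool.and_eq_true, decide_eq_true_eq] at h2
    refine ⟨h2.1, h2.2, ?_⟩
    conv_rhs => rw [pvRunEnd, if_pos hc]
  · rw [pvRunEnd, if_neg hc] at h; omega

-- range(start, e+1, 2) as start followed by the even-offset elements of range(start+1, e+1)
theorem pvRange'_step2 (d : Nat) : ∀ start : Nat,
    List.range' start ((d + 2) / 2) 2 =
      start :: (List.range' (start + 1) d).filter (fun v => (v - start) % 2 == 0) := by
  induction d using Nat.strong_induction_on with
  | _ d ih =>
    intro start
    match d with
    | 0 => simp
    | 1 => simp [List.range'_succ]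
    | (k + 2) =>
      have h1 : (k + 2 + 2) / 2 = (k + 2) / 2 + 1 := by omega
      rw [h1, List.range'_succ, ih k (by omega) (start + 2)]
      have h2 : List.range' (start + 1) (k + 2) =
          (start + 1) :: (start + 2) :: List.range' (start + 3) k := by
        rw [List.range'_succ, List.range'_succ]
      have h3 : List.filter (fun v => (v - (start + 2)) % 2 == 0) (List.range' (start + 3) k) =
          List.filter (fun v => (v - start) % 2 == 0) (List.range' (start + 3) k) := by
        apply List.filter_congr
        intro v hv
        obtain ⟨i, hi, hveq⟩ := List.mem_range'.mp hv
        congr 1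
        omega
      rw [h2, h3]
      simp only [List.filter_cons]
      norm_num

-- A's inner loop appends exactly the even-offset triples up to the end of the run
theorem pvInnerA_char (el : List String) (idx : Int) (start endv : Nat) (acc : _) :
    pvInnerA el idx start endv acc = acc ++
      ((List.range' (endv + 1) (pvRunEnd el endv - endv)).filter
        (fun v => decide (v ≠ start) && ((v - start) % 2 == 0))).map
        (fun v => pvTripA idx start v) := by
  fun_induction pvInnerA el idx start endv acc with
  | case1 endv acc h1 hc e acc' ih =>
    rw [ih]
    conv_rhs => rw [pvRunEnd, if_pos hc]
    have hge := pvRunEnd_ge el (endv + 1)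
    have hr : pvRunEnd el (endv + 1) - endv = (pvRunEnd el (endv + 1) - (endv + 1)) + 1 := by omega
    rw [hr, List.range'_succ, List.filter_cons]
    show (if (decide (endv + 1 ≠ start) && ((endv + 1 - start) % 2 == 0)) = true then
        acc ++ [(((start : Int), idx), (pvMidpointA (start : Int) ((endv + 1 : Nat) : Int), idx), (((endv + 1 : Nat) : Int), idx))]
      else acc) ++ _ = _
    by_cases hp : (decide (endv + 1 ≠ start) && ((endv + 1 - start) % 2 == 0)) = true
    · rw [if_pos hp, if_pos hp]
      simp [pvTripA]
      rfl
    · rw [if_neg hp, if_neg hp]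
  | case2 endv acc h1 hc =>
    rw [pvRunEnd, if_neg hc]
    simp
  | case3 endv acc h1 =>
    rw [pvRunEnd, if_neg (by simp; omega)]
    simp

-- A's contribution at a 'G' position start equals B's block for that start
theorem pvInnerA_block (el : List String) (idx : Int) (start : Nat) (acc : _) :
    pvInnerA el idx start start
      (acc ++ [(((start : Int), idx), (pvMidpointA (start : Int) (start : Int), idx), ((start : Int), idx))]) =
      acc ++ pvBlockB idx start (pvRunEnd el start) := by
  rw [pvInnerA_char]
  have hge := pvRunEnd_ge el start
  have hfc : List.filter (fun v => decide (v ≠ start) && ((v - start) % 2 == 0))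
        (List.range' (start + 1) (pvRunEnd el start - start)) =
      List.filter (fun v => (v - start) % 2 == 0)
        (List.range' (start + 1) (pvRunEnd el start - start)) := by
    apply List.filter_congr
    intro v hv
    obtain ⟨i, hi, rfl⟩ := List.mem_range'.mp hv
    simp
    omega
  have hd : pvRunEnd el start + 2 - start = (pvRunEnd el start - start) + 2 := by omega
  unfold pvBlockB
  rw [hd, pvRange'_step2, List.map_cons, hfc]
  simp [pvTrip, pvTripA, pvMidpointA_eq, List.append_assoc]

theorem pvRuns_G (el : List String) (i : Nat) (hi : i < el.length)
    (hg : (el.getD i "" == "G") = true) :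
    pvRuns el i = (i, pvRunEnd el i) :: pvRuns el (pvRunEnd el i + 1) := by
  conv_lhs => rw [pvRuns]
  rw [dif_pos hi, if_pos hg]

theorem pvRuns_notG (el : List String) (i : Nat) (hi : i < el.length)
    (hg : ¬ (el.getD i "" == "G") = true) :
    pvRuns el i = pvRuns el (i + 1) := by
  conv_lhs => rw [pvRuns]
  rw [dif_pos hi, if_neg hg]

theorem pvFromB_step (el : List String) (idx : Int) (i : Nat) (hi : i < el.length)
    (hg : (el.getD i "" == "G") = true) :
    pvFromB el idx i = pvBlockB idx i (pvRunEnd el i) ++ pvFromB el idx (i + 1) := by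
  have hge := pvRunEnd_ge el i
  unfold pvFromB
  rw [pvRuns_G el i hi hg, List.flatMap_cons]
  have h1 : pvRunEnd el i + 1 - i = (pvRunEnd el i - i) + 1 := by omega
  rw [h1, List.range'_succ, List.flatMap_cons]
  rcases Nat.lt_or_ge i (pvRunEnd el i) with hlt | hge2
  · obtain ⟨hl1, hg1, hr1⟩ := pvRunEnd_succ el i hlt
    rw [List.append_assoc]
    congr 1
    rw [pvRuns_G el (i + 1) hl1 hg1, hr1, List.flatMap_cons]
    congr 1
    have h2 : pvRunEnd el i + 1 - (i + 1) = pvRunEnd el i - i := by omega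
    rw [h2]
  · have heq : pvRunEnd el i = i := by omega
    rw [heq]
    simp only [Nat.sub_self, List.range'_zero, List.flatMap_nil, List.nil_append, List.append_assoc]

theorem pvOuterA_char (el : List String) (idx : Int) (i : Nat) (acc : _) :
    pvOuterA el idx i acc = acc ++ pvFromB el idx i := by
  fun_induction pvOuterA el idx i acc with
  | case1 i acc hi ih =>
    by_cases hg : (el.getD i "" == "G") = true
    · rw [if_pos hg]
      rw [dif_pos hg] at ih
      rw [ih, pvInnerA_block, pvFromB_step el idx i hi hg, List.append_assoc]
    · rw [if_neg hg]
      rw [dif_neg hg] at ih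
      rw [ih]
      congr 1
      unfold pvFromB
      rw [pvRuns_notG el i hi hg]
  | case2 i acc hi =>
    unfold pvFromB
    conv_rhs => rw [pvRuns]
    rw [dif_neg hi]
    simp

-- ===== VERDICT (by name: the statement is the Claim_ definition above) =====
theorem findPairsColumns_spec : Claim_equal_findPairsColumns := by
  intro idx el _
  show findPairsColumns idx el = findPairsColumns_alt idx el
  unfold findPairsColumns
  rw [pvOuterA_char]
  rfl
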